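-- pv_equiv track=rewrite | github.com/djbakerman/meal_planner | meal_planner.py | get_meal_type
-- ===== SOURCE A (Python) =====
-- def get_meal_type(recipe: dict) -> str:
--     """
--     Get meal type from recipe. Uses meal_type field if present, otherwise infers from chapter/name.
--     Returns: 'breakfast', 'lunch', 'dinner', 'dessert', 'snack', or 'any'
--     """
--     # First check if meal_type was set by the AI during extraction
--     stored_meal_type = recipe.get("meal_type", "").lower()
--     if stored_meal_type in ["breakfast", "lunch", "dinner", "any", "dessert", "snack"]:
--         return stored_meal_type
--
--     # Fallback: infer from chapter and name
--     chapter = recipe.get("chapter", "").lower()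
--     name = recipe.get("name", "").lower()
--
--     # Check chapter first - be specific about non-meal categories
--     if any(kw in chapter for kw in ["dessert", "sweets", "baking", "cake", "cookie", "pie"]):
--         return "dessert"
--     if any(kw in chapter for kw in ["snack", "shake", "smoothie", "bar", "bite"]):
--         return "snack"
--     if any(kw in chapter for kw in ["appetizer", "starter"]):
--         return "appetizer"
--     if any(kw in chapter for kw in ["breakfast", "brunch", "morning"]):
--         return "breakfast"
--     if any(kw in chapter for kw in ["lunch", "sandwiches"]):
--         return "lunch"
--     if any(kw in chapter for kw in ["dinner", "entrees", "mains", "main dishes", "suppers"]):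
--         return "dinner"
--     if any(kw in chapter for kw in ["sides", "side dishes", "vegetables"]):
--         return "side"
--
--     # Check recipe name for specific categories
--     dessert_keywords = ["cake", "cookie", "brownie", "pie", "tart", "cheesecake", "pudding",
--                        "ice cream", "mousse", "custard", "crisp", "cobbler", "fudge", "truffle"]
--     if any(kw in name for kw in dessert_keywords):
--         return "dessert"
--
--     snack_keywords = ["bar", "bite", "ball", "shake", "smoothie", "snack", "chip", "cracker"]
--     if any(kw in name for kw in snack_keywords):
--         return "snack"
--
--     breakfast_keywords = ["pancake", "waffle", "omelet", "omelette", "french toast",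
--                          "scramble", "hash", "breakfast", "muffin", "granola", "oatmeal"]
--     if any(kw in name for kw in breakfast_keywords):
--         return "breakfast"
--
--     # Check for main dish indicators - these should be dinner/lunch candidates
--     main_keywords = ["steak", "roast", "chicken", "beef", "pork", "fish", "salmon", "shrimp",
--                     "pasta", "lasagna", "casserole", "curry", "stir fry", "soup", "stew"]
--     if any(kw in name for kw in main_keywords):
--         return "dinner"
--
--     # Salads can go either way
--     if "salad" in name or "salad" in chapter:
--         return "any"
--
--     return "any"
-- ===== SOURCE B (Python) =====
-- _GROUPS = [
--     (0, ("dessert", "sweets", "baking", "cake", "cookie", "pie"), "dessert"),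
--     (0, ("snack", "shake", "smoothie", "bar", "bite"), "snack"),
--     (0, ("appetizer", "starter"), "appetizer"),
--     (0, ("breakfast", "brunch", "morning"), "breakfast"),
--     (0, ("lunch", "sandwiches"), "lunch"),
--     (0, ("dinner", "entrees", "mains", "main dishes", "suppers"), "dinner"),
--     (0, ("sides", "side dishes", "vegetables"), "side"),
--     (1, ("cake", "cookie", "brownie", "pie", "tart", "cheesecake", "pudding",
--          "ice cream", "mousse", "custard", "crisp", "cobbler", "fudge", "truffle"), "dessert"),
--     (1, ("bar", "bite", "ball", "shake", "smoothie", "snack", "chip", "cracker"), "snack"),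
--     (1, ("pancake", "waffle", "omelet", "omelette", "french toast",
--          "scramble", "hash", "breakfast", "muffin", "granola", "oatmeal"), "breakfast"),
--     (1, ("steak", "roast", "chicken", "beef", "pork", "fish", "salmon", "shrimp",
--          "pasta", "lasagna", "casserole", "curry", "stir fry", "soup", "stew"), "dinner"),
-- ]
--
-- # Flattened: one (keyword, field-index, priority, label) record per keyword.
-- _KEYWORD_RULES = [(kw, fld, prio, label)
--                   for prio, (fld, kws, label) in enumerate(_GROUPS)
--                   for kw in kws]
--
--
-- def get_meal_type(recipe: dict) -> str:
--     """
--     Get meal type from recipe. Uses meal_type field if present, otherwise infers from chapter/name.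
--     Returns: 'breakfast', 'lunch', 'dinner', 'dessert', 'snack', or 'any'
--     """
--     stored_meal_type = recipe.get("meal_type", "").lower()
--     if stored_meal_type in ("breakfast", "lunch", "dinner", "any", "dessert", "snack"):
--         return stored_meal_type
--
--     texts = (recipe.get("chapter", "").lower(), recipe.get("name", "").lower())
--
--     # Exhaustive pass over the flat keyword list, keeping the minimum-priority match.
--     best = None
--     for kw, fld, prio, label in _KEYWORD_RULES:
--         if (best is None or prio < best[0]) and kw in texts[fld]:
--             best = (prio, label)
--     return best[1] if best is not None else "any"
-- ===== Notes on version B (the rewrite author's own statement) =====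
-- stated objective: alternative
-- what changed: Replaces the eleven early-return keyword if-chains by one exhaustive pass over a flattened (keyword, field, priority, label) list that keeps the minimum-priority match and reads its label at the end.
import Mathlib
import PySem

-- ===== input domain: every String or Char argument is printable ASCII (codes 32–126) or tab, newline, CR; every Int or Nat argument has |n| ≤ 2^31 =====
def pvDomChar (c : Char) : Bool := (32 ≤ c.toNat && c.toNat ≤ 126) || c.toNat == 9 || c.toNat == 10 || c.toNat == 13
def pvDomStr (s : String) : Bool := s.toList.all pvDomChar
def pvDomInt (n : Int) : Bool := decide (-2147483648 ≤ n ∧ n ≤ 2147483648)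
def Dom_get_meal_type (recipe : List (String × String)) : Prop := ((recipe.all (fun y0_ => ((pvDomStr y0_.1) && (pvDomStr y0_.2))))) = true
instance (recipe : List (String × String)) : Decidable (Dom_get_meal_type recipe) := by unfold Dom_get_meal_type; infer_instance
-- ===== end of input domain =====

-- B replaces A's eleven early-return keyword if-chains by one exhaustive pass over a
-- flattened (keyword, field, priority, label) list keeping the minimum-priority match (alternative; same cost).

-- ===== PORT A =====
def get_meal_type (recipe : List (String × String)) : String :=
  let d := PySem.Dict.mk recipe
  let stored := PySem.Str.lower (d.getD "meal_type" "")
  if (["breakfast", "lunch", "dinner", "any", "dessert", "snack"] : List String).contains stored then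
    stored
  else
    let chapter := PySem.Str.lower (d.getD "chapter" "")
    let name := PySem.Str.lower (d.getD "name" "")
    if (["dessert", "sweets", "baking", "cake", "cookie", "pie"] : List String).any (fun kw => PySem.Str.isIn kw chapter) then "dessert"
    else if (["snack", "shake", "smoothie", "bar", "bite"] : List String).any (fun kw => PySem.Str.isIn kw chapter) then "snack"
    else if (["appetizer", "starter"] : List String).any (fun kw => PySem.Str.isIn kw chapter) then "appetizer"
    else if (["breakfast", "brunch", "morning"] : List String).any (fun kw => PySem.Str.isIn kw chapter) then "breakfast"
    else if (["lunch", "sandwiches"] : List String).any (fun kw => PySem.Str.isIn kw chapter) then "lunch"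
    else if (["dinner", "entrees", "mains", "main dishes", "suppers"] : List String).any (fun kw => PySem.Str.isIn kw chapter) then "dinner"
    else if (["sides", "side dishes", "vegetables"] : List String).any (fun kw => PySem.Str.isIn kw chapter) then "side"
    else if (["cake", "cookie", "brownie", "pie", "tart", "cheesecake", "pudding",
              "ice cream", "mousse", "custard", "crisp", "cobbler", "fudge", "truffle"] : List String).any (fun kw => PySem.Str.isIn kw name) then "dessert"
    else if (["bar", "bite", "ball", "shake", "smoothie", "snack", "chip", "cracker"] : List String).any (fun kw => PySem.Str.isIn kw name) then "snack"
    else if (["pancake", "waffle", "omelet", "omelette", "french toast",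
              "scramble", "hash", "breakfast", "muffin", "granola", "oatmeal"] : List String).any (fun kw => PySem.Str.isIn kw name) then "breakfast"
    else if (["steak", "roast", "chicken", "beef", "pork", "fish", "salmon", "shrimp",
              "pasta", "lasagna", "casserole", "curry", "stir fry", "soup", "stew"] : List String).any (fun kw => PySem.Str.isIn kw name) then "dinner"
    else if PySem.Str.isIn "salad" name || PySem.Str.isIn "salad" chapter then "any"
    else "any"

-- ===== PORT B =====
-- Source B's module-level _GROUPS table: (field index, keywords, label)
def pvGroups : List (Int × List String × String) :=
  [ (0, ["dessert", "sweets", "baking", "cake", "cookie", "pie"], "dessert"),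
    (0, ["snack", "shake", "smoothie", "bar", "bite"], "snack"),
    (0, ["appetizer", "starter"], "appetizer"),
    (0, ["breakfast", "brunch", "morning"], "breakfast"),
    (0, ["lunch", "sandwiches"], "lunch"),
    (0, ["dinner", "entrees", "mains", "main dishes", "suppers"], "dinner"),
    (0, ["sides", "side dishes", "vegetables"], "side"),
    (1, ["cake", "cookie", "brownie", "pie", "tart", "cheesecake", "pudding",
         "ice cream", "mousse", "custard", "crisp", "cobbler", "fudge", "truffle"], "dessert"),
    (1, ["bar", "bite", "ball", "shake", "smoothie", "snack", "chip", "cracker"], "snack"),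
    (1, ["pancake", "waffle", "omelet", "omelette", "french toast",
         "scramble", "hash", "breakfast", "muffin", "granola", "oatmeal"], "breakfast"),
    (1, ["steak", "roast", "chicken", "beef", "pork", "fish", "salmon", "shrimp",
         "pasta", "lasagna", "casserole", "curry", "stir fry", "soup", "stew"], "dinner") ]

-- Source B's _KEYWORD_RULES comprehension: one (keyword, field, priority, label) record per keyword
def pvKeywordRules : List (String × Int × Int × String) :=
  (PySem.List.enumerate pvGroups).flatMap
    (fun pg => pg.2.2.1.map (fun kw => (kw, pg.2.1, pg.1, pg.2.2.2)))

-- the body of Source B's for-loop (texts[fld] on the 2-tuple is 'chapter if fld == 0 else name': exact, fld is 0 or 1)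
def pvStep (chapter name : String) (best : Option (Int × String)) (r : String × Int × Int × String) : Option (Int × String) :=
  if ((match best with | none => true | some b => decide (r.2.2.1 < b.1)) &&
      PySem.Str.isIn r.1 (if r.2.1 = 0 then chapter else name)) then
    some (r.2.2.1, r.2.2.2)
  else best

def get_meal_type_alt (recipe : List (String × String)) : String :=
  let d := PySem.Dict.mk recipe
  let stored := PySem.Str.lower (d.getD "meal_type" "")
  if (["breakfast", "lunch", "dinner", "any", "dessert", "snack"] : List String).contains stored then
    stored
  else
    let chapter := PySem.Str.lower (d.getD "chapter" "")
    let name := PySem.Str.lower (d.getD "name" "")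
    match pvKeywordRules.foldl (pvStep chapter name) none with
    | some b => b.2
    | none => "any"

-- ===== PRECONDITION & SPEC =====
def Spec_get_meal_type (recipe : List (String × String)) (out : String) : Prop := out = get_meal_type_alt recipe
instance (recipe : List (String × String)) (out : String) : Decidable (Spec_get_meal_type recipe out) := by unfold Spec_get_meal_type; infer_instance

-- ===== CLAIM (what is proved, stated in full; the proofs are below) =====
def Claim_equal_get_meal_type : Prop := ∀ (recipe : List (String × String)), Dom_get_meal_type recipe → Spec_get_meal_type recipe (get_meal_type recipe)

-- ===== LEMMAS AND PROOFS =====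

-- once the accumulator holds a priority no later record beats, the fold is constant
theorem pvStep_skip (c n : String) (p : Int) (x : String) :
    ∀ (l : List (String × Int × Int × String)), (∀ r ∈ l, p ≤ r.2.2.1) →
      l.foldl (pvStep c n) (some (p, x)) = some (p, x) := by
  intro l
  induction l with
  | nil => intro _; rfl
  | cons a t ih =>
    intro h
    have ha : p ≤ a.2.2.1 := h a (List.mem_cons_self ..)
    have : pvStep c n (some (p, x)) a = some (p, x) := by
      unfold pvStep
      have : decide (a.2.2.1 < p) = false := by simp; omega
      simp [this]
    simp only [List.foldl_cons, this]
    exact ih (fun r hr => h r (List.mem_cons_of_mem _ hr))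

-- one group's flattened records, starting from an empty accumulator
theorem pvStep_group (c n : String) (fld p : Int) (L : String)
    (rest : List (String × Int × Int × String)) :
    ∀ (kws : List String),
      ((kws.map (fun kw => (kw, fld, p, L))) ++ rest).foldl (pvStep c n) none =
        (if kws.any (fun kw => PySem.Str.isIn kw (if fld = 0 then c else n)) then
          rest.foldl (pvStep c n) (some (p, L))
        else rest.foldl (pvStep c n) none) := by
  intro kws
  induction kws with
  | nil => simp
  | cons kw t ih =>
    by_cases hkw : PySem.Str.isIn kw (if fld = 0 then c else n) = true
    · have hstep : pvStep c n none (kw, fld, p, L) = some (p, L) := by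
        simp only [pvStep, hkw, Bool.true_and, if_true]
      have hin : ∀ r ∈ (t.map (fun kw => (kw, fld, p, L))), p ≤ r.2.2.1 := by
        intro r hr
        obtain ⟨w, _, rfl⟩ := List.mem_map.mp hr
        exact le_refl p
      simp only [List.map_cons, List.cons_append, List.foldl_cons, hstep, List.any_cons, hkw,
        Bool.true_or, if_true, List.foldl_append]
      rw [pvStep_skip c n p L _ hin]
    · have hkw' : PySem.Str.isIn kw (if fld = 0 then c else n) = false := Bool.eq_false_iff.mpr hkw
      have hstep : pvStep c n none (kw, fld, p, L) = none := by
        simp only [pvStep, hkw', Bool.true_and, Bool.false_eq_true, if_false]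
      simp only [List.map_cons, List.cons_append, List.foldl_cons, hstep, List.any_cons, hkw',
        Bool.false_or]
      exact ih

theorem pvStep_groupC (c n : String) (p : Int) (L : String)
    (rest : List (String × Int × Int × String)) (kws : List String) :
    ((kws.map (fun kw => (kw, (0 : Int), p, L))) ++ rest).foldl (pvStep c n) none =
      (if kws.any (fun kw => PySem.Str.isIn kw c) then
        rest.foldl (pvStep c n) (some (p, L))
      else rest.foldl (pvStep c n) none) := by
  simpa using pvStep_group c n 0 p L rest kws

theorem pvStep_groupN (c n : String) (p : Int) (L : String)
    (rest : List (String × Int × Int × String)) (kws : List String) :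
    ((kws.map (fun kw => (kw, (1 : Int), p, L))) ++ rest).foldl (pvStep c n) none =
      (if kws.any (fun kw => PySem.Str.isIn kw n) then
        rest.foldl (pvStep c n) (some (p, L))
      else rest.foldl (pvStep c n) none) := by
  simpa using pvStep_group c n 1 p L rest kws

-- the rule list cut into its eleven group segments (suffixes of the flat list)
def pvSeg11 : List (String × Int × Int × String) := []
def pvSeg10 : List (String × Int × Int × String) :=
  (["steak", "roast", "chicken", "beef", "pork", "fish", "salmon", "shrimp", "pasta", "lasagna", "casserole", "curry", "stir fry", "soup", "stew"] : List String).map (fun kw => (kw, (1 : Int), (10 : Int), "dinner")) ++ pvSeg11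
def pvSeg9 : List (String × Int × Int × String) :=
  (["pancake", "waffle", "omelet", "omelette", "french toast", "scramble", "hash", "breakfast", "muffin", "granola", "oatmeal"] : List String).map (fun kw => (kw, (1 : Int), (9 : Int), "breakfast")) ++ pvSeg10
def pvSeg8 : List (String × Int × Int × String) :=
  (["bar", "bite", "ball", "shake", "smoothie", "snack", "chip", "cracker"] : List String).map (fun kw => (kw, (1 : Int), (8 : Int), "snack")) ++ pvSeg9
def pvSeg7 : List (String × Int × Int × String) :=
  (["cake", "cookie", "brownie", "pie", "tart", "cheesecake", "pudding", "ice cream", "mousse", "custard", "crisp", "cobbler", "fudge", "truffle"] : List String).map (fun kw => (kw, (1 : Int), (7 : Int), "dessert")) ++ pvSeg8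
def pvSeg6 : List (String × Int × Int × String) :=
  (["sides", "side dishes", "vegetables"] : List String).map (fun kw => (kw, (0 : Int), (6 : Int), "side")) ++ pvSeg7
def pvSeg5 : List (String × Int × Int × String) :=
  (["dinner", "entrees", "mains", "main dishes", "suppers"] : List String).map (fun kw => (kw, (0 : Int), (5 : Int), "dinner")) ++ pvSeg6
def pvSeg4 : List (String × Int × Int × String) :=
  (["lunch", "sandwiches"] : List String).map (fun kw => (kw, (0 : Int), (4 : Int), "lunch")) ++ pvSeg5
def pvSeg3 : List (String × Int × Int × String) :=
  (["breakfast", "brunch", "morning"] : List String).map (fun kw => (kw, (0 : Int), (3 : Int), "breakfast")) ++ pvSeg4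
def pvSeg2 : List (String × Int × Int × String) :=
  (["appetizer", "starter"] : List String).map (fun kw => (kw, (0 : Int), (2 : Int), "appetizer")) ++ pvSeg3
def pvSeg1 : List (String × Int × Int × String) :=
  (["snack", "shake", "smoothie", "bar", "bite"] : List String).map (fun kw => (kw, (0 : Int), (1 : Int), "snack")) ++ pvSeg2
def pvSeg0 : List (String × Int × Int × String) :=
  (["dessert", "sweets", "baking", "cake", "cookie", "pie"] : List String).map (fun kw => (kw, (0 : Int), (0 : Int), "dessert")) ++ pvSeg1

set_option maxRecDepth 8192 in
theorem pvRules_eq : pvKeywordRules = pvSeg0 := by rfl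

theorem pvSegFold11 (c n : String) : pvSeg11.foldl (pvStep c n) none = none := rfl

theorem pvSegFold10 (c n : String) : pvSeg10.foldl (pvStep c n) none =
    (if (["steak", "roast", "chicken", "beef", "pork", "fish", "salmon", "shrimp", "pasta", "lasagna", "casserole", "curry", "stir fry", "soup", "stew"] : List String).any (fun kw => PySem.Str.isIn kw n) then some ((10 : Int), "dinner") else
    (none : Option (Int × String))) := by
  rw [show pvSeg10 = (["steak", "roast", "chicken", "beef", "pork", "fish", "salmon", "shrimp", "pasta", "lasagna", "casserole", "curry", "stir fry", "soup", "stew"] : List String).map (fun kw => (kw, (1 : Int), (10 : Int), "dinner")) ++ pvSeg11 from rfl]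
  rw [pvStep_groupN]
  by_cases h : ((["steak", "roast", "chicken", "beef", "pork", "fish", "salmon", "shrimp", "pasta", "lasagna", "casserole", "curry", "stir fry", "soup", "stew"] : List String).any (fun kw => PySem.Str.isIn kw n)) = true
  · simp only [h, if_true]
    refine pvStep_skip c n 10 "dinner" _ ?_
    decide
  · simp only [h, Bool.false_eq_true, if_false]
    exact pvSegFold11 c n

theorem pvSegFold9 (c n : String) : pvSeg9.foldl (pvStep c n) none =
    (if (["pancake", "waffle", "omelet", "omelette", "french toast", "scramble", "hash", "breakfast", "muffin", "granola", "oatmeal"] : List String).any (fun kw => PySem.Str.isIn kw n) then some ((9 : Int), "breakfast") else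
    (if (["steak", "roast", "chicken", "beef", "pork", "fish", "salmon", "shrimp", "pasta", "lasagna", "casserole", "curry", "stir fry", "soup", "stew"] : List String).any (fun kw => PySem.Str.isIn kw n) then some ((10 : Int), "dinner") else
    (none : Option (Int × String)))) := by
  rw [show pvSeg9 = (["pancake", "waffle", "omelet", "omelette", "french toast", "scramble", "hash", "breakfast", "muffin", "granola", "oatmeal"] : List String).map (fun kw => (kw, (1 : Int), (9 : Int), "breakfast")) ++ pvSeg10 from rfl]
  rw [pvStep_groupN]
  by_cases h : ((["pancake", "waffle", "omelet", "omelette", "french toast", "scramble", "hash", "breakfast", "muffin", "granola", "oatmeal"] : List String).any (fun kw => PySem.Str.isIn kw n)) = true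
  · simp only [h, if_true]
    refine pvStep_skip c n 9 "breakfast" _ ?_
    decide
  · simp only [h, Bool.false_eq_true, if_false]
    exact pvSegFold10 c n

theorem pvSegFold8 (c n : String) : pvSeg8.foldl (pvStep c n) none =
    (if (["bar", "bite", "ball", "shake", "smoothie", "snack", "chip", "cracker"] : List String).any (fun kw => PySem.Str.isIn kw n) then some ((8 : Int), "snack") else
    (if (["pancake", "waffle", "omelet", "omelette", "french toast", "scramble", "hash", "breakfast", "muffin", "granola", "oatmeal"] : List String).any (fun kw => PySem.Str.isIn kw n) then some ((9 : Int), "breakfast") else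
    (if (["steak", "roast", "chicken", "beef", "pork", "fish", "salmon", "shrimp", "pasta", "lasagna", "casserole", "curry", "stir fry", "soup", "stew"] : List String).any (fun kw => PySem.Str.isIn kw n) then some ((10 : Int), "dinner") else
    (none : Option (Int × String))))) := by
  rw [show pvSeg8 = (["bar", "bite", "ball", "shake", "smoothie", "snack", "chip", "cracker"] : List String).map (fun kw => (kw, (1 : Int), (8 : Int), "snack")) ++ pvSeg9 from rfl]
  rw [pvStep_groupN]
  by_cases h : ((["bar", "bite", "ball", "shake", "smoothie", "snack", "chip", "cracker"] : List String).any (fun kw => PySem.Str.isIn kw n)) = true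
  · simp only [h, if_true]
    refine pvStep_skip c n 8 "snack" _ ?_
    decide
  · simp only [h, Bool.false_eq_true, if_false]
    exact pvSegFold9 c n

theorem pvSegFold7 (c n : String) : pvSeg7.foldl (pvStep c n) none =
    (if (["cake", "cookie", "brownie", "pie", "tart", "cheesecake", "pudding", "ice cream", "mousse", "custard", "crisp", "cobbler", "fudge", "truffle"] : List String).any (fun kw => PySem.Str.isIn kw n) then some ((7 : Int), "dessert") else
    (if (["bar", "bite", "ball", "shake", "smoothie", "snack", "chip", "cracker"] : List String).any (fun kw => PySem.Str.isIn kw n) then some ((8 : Int), "snack") else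
    (if (["pancake", "waffle", "omelet", "omelette", "french toast", "scramble", "hash", "breakfast", "muffin", "granola", "oatmeal"] : List String).any (fun kw => PySem.Str.isIn kw n) then some ((9 : Int), "breakfast") else
    (if (["steak", "roast", "chicken", "beef", "pork", "fish", "salmon", "shrimp", "pasta", "lasagna", "casserole", "curry", "stir fry", "soup", "stew"] : List String).any (fun kw => PySem.Str.isIn kw n) then some ((10 : Int), "dinner") else
    (none : Option (Int × String)))))) := by
  rw [show pvSeg7 = (["cake", "cookie", "brownie", "pie", "tart", "cheesecake", "pudding", "ice cream", "mousse", "custard", "crisp", "cobbler", "fudge", "truffle"] : List String).map (fun kw => (kw, (1 : Int), (7 : Int), "dessert")) ++ pvSeg8 from rfl]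
  rw [pvStep_groupN]
  by_cases h : ((["cake", "cookie", "brownie", "pie", "tart", "cheesecake", "pudding", "ice cream", "mousse", "custard", "crisp", "cobbler", "fudge", "truffle"] : List String).any (fun kw => PySem.Str.isIn kw n)) = true
  · simp only [h, if_true]
    refine pvStep_skip c n 7 "dessert" _ ?_
    decide
  · simp only [h, Bool.false_eq_true, if_false]
    exact pvSegFold8 c n

theorem pvSegFold6 (c n : String) : pvSeg6.foldl (pvStep c n) none =
    (if (["sides", "side dishes", "vegetables"] : List String).any (fun kw => PySem.Str.isIn kw c) then some ((6 : Int), "side") else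
    (if (["cake", "cookie", "brownie", "pie", "tart", "cheesecake", "pudding", "ice cream", "mousse", "custard", "crisp", "cobbler", "fudge", "truffle"] : List String).any (fun kw => PySem.Str.isIn kw n) then some ((7 : Int), "dessert") else
    (if (["bar", "bite", "ball", "shake", "smoothie", "snack", "chip", "cracker"] : List String).any (fun kw => PySem.Str.isIn kw n) then some ((8 : Int), "snack") else
    (if (["pancake", "waffle", "omelet", "omelette", "french toast", "scramble", "hash", "breakfast", "muffin", "granola", "oatmeal"] : List String).any (fun kw => PySem.Str.isIn kw n) then some ((9 : Int), "breakfast") else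
    (if (["steak", "roast", "chicken", "beef", "pork", "fish", "salmon", "shrimp", "pasta", "lasagna", "casserole", "curry", "stir fry", "soup", "stew"] : List String).any (fun kw => PySem.Str.isIn kw n) then some ((10 : Int), "dinner") else
    (none : Option (Int × String))))))) := by
  rw [show pvSeg6 = (["sides", "side dishes", "vegetables"] : List String).map (fun kw => (kw, (0 : Int), (6 : Int), "side")) ++ pvSeg7 from rfl]
  rw [pvStep_groupC]
  by_cases h : ((["sides", "side dishes", "vegetables"] : List String).any (fun kw => PySem.Str.isIn kw c)) = true
  · simp only [h, if_true]
    refine pvStep_skip c n 6 "side" _ ?_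
    decide
  · simp only [h, Bool.false_eq_true, if_false]
    exact pvSegFold7 c n

theorem pvSegFold5 (c n : String) : pvSeg5.foldl (pvStep c n) none =
    (if (["dinner", "entrees", "mains", "main dishes", "suppers"] : List String).any (fun kw => PySem.Str.isIn kw c) then some ((5 : Int), "dinner") else
    (if (["sides", "side dishes", "vegetables"] : List String).any (fun kw => PySem.Str.isIn kw c) then some ((6 : Int), "side") else
    (if (["cake", "cookie", "brownie", "pie", "tart", "cheesecake", "pudding", "ice cream", "mousse", "custard", "crisp", "cobbler", "fudge", "truffle"] : List String).any (fun kw => PySem.Str.isIn kw n) then some ((7 : Int), "dessert") else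
    (if (["bar", "bite", "ball", "shake", "smoothie", "snack", "chip", "cracker"] : List String).any (fun kw => PySem.Str.isIn kw n) then some ((8 : Int), "snack") else
    (if (["pancake", "waffle", "omelet", "omelette", "french toast", "scramble", "hash", "breakfast", "muffin", "granola", "oatmeal"] : List String).any (fun kw => PySem.Str.isIn kw n) then some ((9 : Int), "breakfast") else
    (if (["steak", "roast", "chicken", "beef", "pork", "fish", "salmon", "shrimp", "pasta", "lasagna", "casserole", "curry", "stir fry", "soup", "stew"] : List String).any (fun kw => PySem.Str.isIn kw n) then some ((10 : Int), "dinner") else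
    (none : Option (Int × String)))))))) := by
  rw [show pvSeg5 = (["dinner", "entrees", "mains", "main dishes", "suppers"] : List String).map (fun kw => (kw, (0 : Int), (5 : Int), "dinner")) ++ pvSeg6 from rfl]
  rw [pvStep_groupC]
  by_cases h : ((["dinner", "entrees", "mains", "main dishes", "suppers"] : List String).any (fun kw => PySem.Str.isIn kw c)) = true
  · simp only [h, if_true]
    refine pvStep_skip c n 5 "dinner" _ ?_
    decide
  · simp only [h, Bool.false_eq_true, if_false]
    exact pvSegFold6 c n

theorem pvSegFold4 (c n : String) : pvSeg4.foldl (pvStep c n) none =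
    (if (["lunch", "sandwiches"] : List String).any (fun kw => PySem.Str.isIn kw c) then some ((4 : Int), "lunch") else
    (if (["dinner", "entrees", "mains", "main dishes", "suppers"] : List String).any (fun kw => PySem.Str.isIn kw c) then some ((5 : Int), "dinner") else
    (if (["sides", "side dishes", "vegetables"] : List String).any (fun kw => PySem.Str.isIn kw c) then some ((6 : Int), "side") else
    (if (["cake", "cookie", "brownie", "pie", "tart", "cheesecake", "pudding", "ice cream", "mousse", "custard", "crisp", "cobbler", "fudge", "truffle"] : List String).any (fun kw => PySem.Str.isIn kw n) then some ((7 : Int), "dessert") else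
    (if (["bar", "bite", "ball", "shake", "smoothie", "snack", "chip", "cracker"] : List String).any (fun kw => PySem.Str.isIn kw n) then some ((8 : Int), "snack") else
    (if (["pancake", "waffle", "omelet", "omelette", "french toast", "scramble", "hash", "breakfast", "muffin", "granola", "oatmeal"] : List String).any (fun kw => PySem.Str.isIn kw n) then some ((9 : Int), "breakfast") else
    (if (["steak", "roast", "chicken", "beef", "pork", "fish", "salmon", "shrimp", "pasta", "lasagna", "casserole", "curry", "stir fry", "soup", "stew"] : List String).any (fun kw => PySem.Str.isIn kw n) then some ((10 : Int), "dinner") else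
    (none : Option (Int × String))))))))) := by
  rw [show pvSeg4 = (["lunch", "sandwiches"] : List String).map (fun kw => (kw, (0 : Int), (4 : Int), "lunch")) ++ pvSeg5 from rfl]
  rw [pvStep_groupC]
  by_cases h : ((["lunch", "sandwiches"] : List String).any (fun kw => PySem.Str.isIn kw c)) = true
  · simp only [h, if_true]
    refine pvStep_skip c n 4 "lunch" _ ?_
    decide
  · simp only [h, Bool.false_eq_true, if_false]
    exact pvSegFold5 c n

theorem pvSegFold3 (c n : String) : pvSeg3.foldl (pvStep c n) none =
    (if (["breakfast", "brunch", "morning"] : List String).any (fun kw => PySem.Str.isIn kw c) then some ((3 : Int), "breakfast") else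
    (if (["lunch", "sandwiches"] : List String).any (fun kw => PySem.Str.isIn kw c) then some ((4 : Int), "lunch") else
    (if (["dinner", "entrees", "mains", "main dishes", "suppers"] : List String).any (fun kw => PySem.Str.isIn kw c) then some ((5 : Int), "dinner") else
    (if (["sides", "side dishes", "vegetables"] : List String).any (fun kw => PySem.Str.isIn kw c) then some ((6 : Int), "side") else
    (if (["cake", "cookie", "brownie", "pie", "tart", "cheesecake", "pudding", "ice cream", "mousse", "custard", "crisp", "cobbler", "fudge", "truffle"] : List String).any (fun kw => PySem.Str.isIn kw n) then some ((7 : Int), "dessert") else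
    (if (["bar", "bite", "ball", "shake", "smoothie", "snack", "chip", "cracker"] : List String).any (fun kw => PySem.Str.isIn kw n) then some ((8 : Int), "snack") else
    (if (["pancake", "waffle", "omelet", "omelette", "french toast", "scramble", "hash", "breakfast", "muffin", "granola", "oatmeal"] : List String).any (fun kw => PySem.Str.isIn kw n) then some ((9 : Int), "breakfast") else
    (if (["steak", "roast", "chicken", "beef", "pork", "fish", "salmon", "shrimp", "pasta", "lasagna", "casserole", "curry", "stir fry", "soup", "stew"] : List String).any (fun kw => PySem.Str.isIn kw n) then some ((10 : Int), "dinner") else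
    (none : Option (Int × String)))))))))) := by
  rw [show pvSeg3 = (["breakfast", "brunch", "morning"] : List String).map (fun kw => (kw, (0 : Int), (3 : Int), "breakfast")) ++ pvSeg4 from rfl]
  rw [pvStep_groupC]
  by_cases h : ((["breakfast", "brunch", "morning"] : List String).any (fun kw => PySem.Str.isIn kw c)) = true
  · simp only [h, if_true]
    refine pvStep_skip c n 3 "breakfast" _ ?_
    decide
  · simp only [h, Bool.false_eq_true, if_false]
    exact pvSegFold4 c n

theorem pvSegFold2 (c n : String) : pvSeg2.foldl (pvStep c n) none =
    (if (["appetizer", "starter"] : List String).any (fun kw => PySem.Str.isIn kw c) then some ((2 : Int), "appetizer") else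
    (if (["breakfast", "brunch", "morning"] : List String).any (fun kw => PySem.Str.isIn kw c) then some ((3 : Int), "breakfast") else
    (if (["lunch", "sandwiches"] : List String).any (fun kw => PySem.Str.isIn kw c) then some ((4 : Int), "lunch") else
    (if (["dinner", "entrees", "mains", "main dishes", "suppers"] : List String).any (fun kw => PySem.Str.isIn kw c) then some ((5 : Int), "dinner") else
    (if (["sides", "side dishes", "vegetables"] : List String).any (fun kw => PySem.Str.isIn kw c) then some ((6 : Int), "side") else
    (if (["cake", "cookie", "brownie", "pie", "tart", "cheesecake", "pudding", "ice cream", "mousse", "custard", "crisp", "cobbler", "fudge", "truffle"] : List String).any (fun kw => PySem.Str.isIn kw n) then some ((7 : Int), "dessert") else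
    (if (["bar", "bite", "ball", "shake", "smoothie", "snack", "chip", "cracker"] : List String).any (fun kw => PySem.Str.isIn kw n) then some ((8 : Int), "snack") else
    (if (["pancake", "waffle", "omelet", "omelette", "french toast", "scramble", "hash", "breakfast", "muffin", "granola", "oatmeal"] : List String).any (fun kw => PySem.Str.isIn kw n) then some ((9 : Int), "breakfast") else
    (if (["steak", "roast", "chicken", "beef", "pork", "fish", "salmon", "shrimp", "pasta", "lasagna", "casserole", "curry", "stir fry", "soup", "stew"] : List String).any (fun kw => PySem.Str.isIn kw n) then some ((10 : Int), "dinner") else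
    (none : Option (Int × String))))))))))) := by
  rw [show pvSeg2 = (["appetizer", "starter"] : List String).map (fun kw => (kw, (0 : Int), (2 : Int), "appetizer")) ++ pvSeg3 from rfl]
  rw [pvStep_groupC]
  by_cases h : ((["appetizer", "starter"] : List String).any (fun kw => PySem.Str.isIn kw c)) = true
  · simp only [h, if_true]
    refine pvStep_skip c n 2 "appetizer" _ ?_
    decide
  · simp only [h, Bool.false_eq_true, if_false]
    exact pvSegFold3 c n

theorem pvSegFold1 (c n : String) : pvSeg1.foldl (pvStep c n) none =
    (if (["snack", "shake", "smoothie", "bar", "bite"] : List String).any (fun kw => PySem.Str.isIn kw c) then some ((1 : Int), "snack") else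
    (if (["appetizer", "starter"] : List String).any (fun kw => PySem.Str.isIn kw c) then some ((2 : Int), "appetizer") else
    (if (["breakfast", "brunch", "morning"] : List String).any (fun kw => PySem.Str.isIn kw c) then some ((3 : Int), "breakfast") else
    (if (["lunch", "sandwiches"] : List String).any (fun kw => PySem.Str.isIn kw c) then some ((4 : Int), "lunch") else
    (if (["dinner", "entrees", "mains", "main dishes", "suppers"] : List String).any (fun kw => PySem.Str.isIn kw c) then some ((5 : Int), "dinner") else
    (if (["sides", "side dishes", "vegetables"] : List String).any (fun kw => PySem.Str.isIn kw c) then some ((6 : Int), "side") else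
    (if (["cake", "cookie", "brownie", "pie", "tart", "cheesecake", "pudding", "ice cream", "mousse", "custard", "crisp", "cobbler", "fudge", "truffle"] : List String).any (fun kw => PySem.Str.isIn kw n) then some ((7 : Int), "dessert") else
    (if (["bar", "bite", "ball", "shake", "smoothie", "snack", "chip", "cracker"] : List String).any (fun kw => PySem.Str.isIn kw n) then some ((8 : Int), "snack") else
    (if (["pancake", "waffle", "omelet", "omelette", "french toast", "scramble", "hash", "breakfast", "muffin", "granola", "oatmeal"] : List String).any (fun kw => PySem.Str.isIn kw n) then some ((9 : Int), "breakfast") else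
    (if (["steak", "roast", "chicken", "beef", "pork", "fish", "salmon", "shrimp", "pasta", "lasagna", "casserole", "curry", "stir fry", "soup", "stew"] : List String).any (fun kw => PySem.Str.isIn kw n) then some ((10 : Int), "dinner") else
    (none : Option (Int × String)))))))))))) := by
  rw [show pvSeg1 = (["snack", "shake", "smoothie", "bar", "bite"] : List String).map (fun kw => (kw, (0 : Int), (1 : Int), "snack")) ++ pvSeg2 from rfl]
  rw [pvStep_groupC]
  by_cases h : ((["snack", "shake", "smoothie", "bar", "bite"] : List String).any (fun kw => PySem.Str.isIn kw c)) = true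
  · simp only [h, if_true]
    refine pvStep_skip c n 1 "snack" _ ?_
    decide
  · simp only [h, Bool.false_eq_true, if_false]
    exact pvSegFold2 c n

theorem pvSegFold0 (c n : String) : pvSeg0.foldl (pvStep c n) none =
    (if (["dessert", "sweets", "baking", "cake", "cookie", "pie"] : List String).any (fun kw => PySem.Str.isIn kw c) then some ((0 : Int), "dessert") else
    (if (["snack", "shake", "smoothie", "bar", "bite"] : List String).any (fun kw => PySem.Str.isIn kw c) then some ((1 : Int), "snack") else
    (if (["appetizer", "starter"] : List String).any (fun kw => PySem.Str.isIn kw c) then some ((2 : Int), "appetizer") else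
    (if (["breakfast", "brunch", "morning"] : List String).any (fun kw => PySem.Str.isIn kw c) then some ((3 : Int), "breakfast") else
    (if (["lunch", "sandwiches"] : List String).any (fun kw => PySem.Str.isIn kw c) then some ((4 : Int), "lunch") else
    (if (["dinner", "entrees", "mains", "main dishes", "suppers"] : List String).any (fun kw => PySem.Str.isIn kw c) then some ((5 : Int), "dinner") else
    (if (["sides", "side dishes", "vegetables"] : List String).any (fun kw => PySem.Str.isIn kw c) then some ((6 : Int), "side") else
    (if (["cake", "cookie", "brownie", "pie", "tart", "cheesecake", "pudding", "ice cream", "mousse", "custard", "crisp", "cobbler", "fudge", "truffle"] : List String).any (fun kw => PySem.Str.isIn kw n) then some ((7 : Int), "dessert") else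
    (if (["bar", "bite", "ball", "shake", "smoothie", "snack", "chip", "cracker"] : List String).any (fun kw => PySem.Str.isIn kw n) then some ((8 : Int), "snack") else
    (if (["pancake", "waffle", "omelet", "omelette", "french toast", "scramble", "hash", "breakfast", "muffin", "granola", "oatmeal"] : List String).any (fun kw => PySem.Str.isIn kw n) then some ((9 : Int), "breakfast") else
    (if (["steak", "roast", "chicken", "beef", "pork", "fish", "salmon", "shrimp", "pasta", "lasagna", "casserole", "curry", "stir fry", "soup", "stew"] : List String).any (fun kw => PySem.Str.isIn kw n) then some ((10 : Int), "dinner") else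
    (none : Option (Int × String))))))))))))) := by
  rw [show pvSeg0 = (["dessert", "sweets", "baking", "cake", "cookie", "pie"] : List String).map (fun kw => (kw, (0 : Int), (0 : Int), "dessert")) ++ pvSeg1 from rfl]
  rw [pvStep_groupC]
  by_cases h : ((["dessert", "sweets", "baking", "cake", "cookie", "pie"] : List String).any (fun kw => PySem.Str.isIn kw c)) = true
  · simp only [h, if_true]
    refine pvStep_skip c n 0 "dessert" _ ?_
    decide
  · simp only [h, Bool.false_eq_true, if_false]
    exact pvSegFold1 c n

-- the whole fold equals A's keyword if-chain (without the salad branch, whose arms coincide)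
set_option maxRecDepth 65536 in
set_option maxHeartbeats 1000000 in
theorem pvScan_eq (c n : String) :
    (match pvKeywordRules.foldl (pvStep c n) none with | some b => b.2 | none => "any") =
      (if (["dessert", "sweets", "baking", "cake", "cookie", "pie"] : List String).any (fun kw => PySem.Str.isIn kw c) then "dessert" else
      (if (["snack", "shake", "smoothie", "bar", "bite"] : List String).any (fun kw => PySem.Str.isIn kw c) then "snack" else
      (if (["appetizer", "starter"] : List String).any (fun kw => PySem.Str.isIn kw c) then "appetizer" else
      (if (["breakfast", "brunch", "morning"] : List String).any (fun kw => PySem.Str.isIn kw c) then "breakfast" else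
      (if (["lunch", "sandwiches"] : List String).any (fun kw => PySem.Str.isIn kw c) then "lunch" else
      (if (["dinner", "entrees", "mains", "main dishes", "suppers"] : List String).any (fun kw => PySem.Str.isIn kw c) then "dinner" else
      (if (["sides", "side dishes", "vegetables"] : List String).any (fun kw => PySem.Str.isIn kw c) then "side" else
      (if (["cake", "cookie", "brownie", "pie", "tart", "cheesecake", "pudding", "ice cream", "mousse", "custard", "crisp", "cobbler", "fudge", "truffle"] : List String).any (fun kw => PySem.Str.isIn kw n) then "dessert" else
      (if (["bar", "bite", "ball", "shake", "smoothie", "snack", "chip", "cracker"] : List String).any (fun kw => PySem.Str.isIn kw n) then "snack" else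
      (if (["pancake", "waffle", "omelet", "omelette", "french toast", "scramble", "hash", "breakfast", "muffin", "granola", "oatmeal"] : List String).any (fun kw => PySem.Str.isIn kw n) then "breakfast" else
      (if (["steak", "roast", "chicken", "beef", "pork", "fish", "salmon", "shrimp", "pasta", "lasagna", "casserole", "curry", "stir fry", "soup", "stew"] : List String).any (fun kw => PySem.Str.isIn kw n) then "dinner" else
      "any"))))))))))) := by
  rw [pvRules_eq, pvSegFold0]
  by_cases h0 : ((["dessert", "sweets", "baking", "cake", "cookie", "pie"] : List String).any (fun kw => PySem.Str.isIn kw c)) = true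
  · simp only [h0, if_true]
  · simp only [h0, Bool.false_eq_true, if_false]
    by_cases h1 : ((["snack", "shake", "smoothie", "bar", "bite"] : List String).any (fun kw => PySem.Str.isIn kw c)) = true
    · simp only [h1, if_true]
    · simp only [h1, Bool.false_eq_true, if_false]
      by_cases h2 : ((["appetizer", "starter"] : List String).any (fun kw => PySem.Str.isIn kw c)) = true
      · simp only [h2, if_true]
      · simp only [h2, Bool.false_eq_true, if_false]
        by_cases h3 : ((["breakfast", "brunch", "morning"] : List String).any (fun kw => PySem.Str.isIn kw c)) = true
        · simp only [h3, if_true]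
        · simp only [h3, Bool.false_eq_true, if_false]
          by_cases h4 : ((["lunch", "sandwiches"] : List String).any (fun kw => PySem.Str.isIn kw c)) = true
          · simp only [h4, if_true]
          · simp only [h4, Bool.false_eq_true, if_false]
            by_cases h5 : ((["dinner", "entrees", "mains", "main dishes", "suppers"] : List String).any (fun kw => PySem.Str.isIn kw c)) = true
            · simp only [h5, if_true]
            · simp only [h5, Bool.false_eq_true, if_false]
              by_cases h6 : ((["sides", "side dishes", "vegetables"] : List String).any (fun kw => PySem.Str.isIn kw c)) = true
              · simp only [h6, if_true]
              · simp only [h6, Bool.false_eq_true, if_false]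
                by_cases h7 : ((["cake", "cookie", "brownie", "pie", "tart", "cheesecake", "pudding", "ice cream", "mousse", "custard", "crisp", "cobbler", "fudge", "truffle"] : List String).any (fun kw => PySem.Str.isIn kw n)) = true
                · simp only [h7, if_true]
                · simp only [h7, Bool.false_eq_true, if_false]
                  by_cases h8 : ((["bar", "bite", "ball", "shake", "smoothie", "snack", "chip", "cracker"] : List String).any (fun kw => PySem.Str.isIn kw n)) = true
                  · simp only [h8, if_true]
                  · simp only [h8, Bool.false_eq_true, if_false]
                    by_cases h9 : ((["pancake", "waffle", "omelet", "omelette", "french toast", "scramble", "hash", "breakfast", "muffin", "granola", "oatmeal"] : List String).any (fun kw => PySem.Str.isIn kw n)) = true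
                    · simp only [h9, if_true]
                    · simp only [h9, Bool.false_eq_true, if_false]
                      by_cases h10 : ((["steak", "roast", "chicken", "beef", "pork", "fish", "salmon", "shrimp", "pasta", "lasagna", "casserole", "curry", "stir fry", "soup", "stew"] : List String).any (fun kw => PySem.Str.isIn kw n)) = true
                      · simp only [h10, if_true]
                      · simp only [h10, Bool.false_eq_true, if_false]

-- ===== VERDICT (by name: the statement is the Claim_ definition above) =====
set_option maxRecDepth 65536 in
set_option maxHeartbeats 1000000 in
theorem get_meal_type_spec : Claim_equal_get_meal_type := by
  intro recipe _
  unfold Spec_get_meal_type get_meal_type get_meal_type_alt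
  by_cases h : ((["breakfast", "lunch", "dinner", "any", "dessert", "snack"] : List String).contains (PySem.Str.lower ((PySem.Dict.mk recipe).getD "meal_type" ""))) = true
  · simp only [h, if_true]
  · simp only [h, Bool.false_eq_true, if_false, ite_self]
    exact (pvScan_eq _ _).symm
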